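-- pv_equiv track=rewrite | github.com/libharmo/libharmo.github.io | code/py/icfctclb/subSortOutDependency.py | trimMapKey0
-- ===== SOURCE A (Python) =====
-- def trimMapKey0(m):
--     kList = []
--     for k in m:
--         if len(m[k]) == 0:
--             kList.append(k)
--     for k in kList:
--         m.pop(k)
--     return m
-- ===== SOURCE B (Python) =====
-- def trimMapKey0(m):
--     kept = {k: v for k, v in m.items() if len(v) != 0}
--     m.clear()
--     m.update(kept)
--     return m
-- ===== Notes on version B (the rewrite author's own statement) =====
-- stated objective: simpler
-- what changed: B builds the surviving entries in one dict comprehension and bulk-replaces m's contents with clear()+update(), instead of A's collect-keys-to-remove list followed by a second pop loop.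
import Mathlib
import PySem

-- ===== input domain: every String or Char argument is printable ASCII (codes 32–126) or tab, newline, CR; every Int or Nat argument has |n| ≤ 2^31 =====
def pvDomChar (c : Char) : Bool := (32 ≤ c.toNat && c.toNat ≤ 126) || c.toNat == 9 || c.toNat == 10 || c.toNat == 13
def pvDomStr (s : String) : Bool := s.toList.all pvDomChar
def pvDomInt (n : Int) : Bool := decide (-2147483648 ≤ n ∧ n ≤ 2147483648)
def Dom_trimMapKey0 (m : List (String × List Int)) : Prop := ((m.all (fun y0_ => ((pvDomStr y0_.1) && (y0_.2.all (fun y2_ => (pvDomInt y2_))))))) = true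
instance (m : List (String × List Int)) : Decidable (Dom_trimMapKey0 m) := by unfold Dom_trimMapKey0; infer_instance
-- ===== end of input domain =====

-- B replaces A's collect-keys-then-pop-each strategy by one filter pass that keeps the
-- nonempty-valued entries (objective: simpler). Both A and B mutate the dict m in place in
-- Python; the equivalence proved here is about the returned value.

-- ===== PORT A =====
-- kList = []; for k in m: if len(m[k]) == 0: kList.append(k); for k in kList: m.pop(k); return m
def trimMapKey0 (m : List (String × List Int)) : List (String × List Int) :=
  let kList : List String :=
    m.foldl (fun acc kv =>
      if ((PySem.Dict.mk m).getD kv.1 []).length == 0 then acc ++ [kv.1] else acc) []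
  (kList.foldl (fun d k => d.erase k) (PySem.Dict.mk m)).items

-- ===== PORT B =====
-- kept = {k: v for k, v in m.items() if len(v) != 0}; m.clear(); m.update(kept); return m
def trimMapKey0_alt (m : List (String × List Int)) : List (String × List Int) :=
  let kept := m.filter (fun kv => kv.2.length != 0)
  kept

-- ===== PRECONDITION & SPEC =====
-- The association list encodes a Python dict, whose keys are necessarily distinct; a
-- duplicate-key list corresponds to no Python input of A, so it lies outside the claim.
def Pre_trimMapKey0 (m : List (String × List Int)) : Prop := (m.map Prod.fst).Nodup
instance (m : List (String × List Int)) : Decidable (Pre_trimMapKey0 m) := by unfold Pre_trimMapKey0; infer_instance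
def pvWitness_trimMapKey0 : (List (String × List Int)) := [("a", [1, 2]), ("b", []), ("c", [3])]
def Spec_trimMapKey0 (m : List (String × List Int)) (out : List (String × List Int)) : Prop := out = trimMapKey0_alt m
instance (m : List (String × List Int)) (out : List (String × List Int)) : Decidable (Spec_trimMapKey0 m out) := by unfold Spec_trimMapKey0; infer_instance

-- ===== CLAIM (what is proved, stated in full; the proofs are below) =====
def Claim_equal_trimMapKey0 : Prop := ∀ (m : List (String × List Int)), Dom_trimMapKey0 m → Pre_trimMapKey0 m → Spec_trimMapKey0 m (trimMapKey0 m)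

-- ===== LEMMAS AND PROOFS =====

-- A's first loop appends the keys of the entries satisfying the test.
theorem foldl_append_key_if {α β : Type} (p : α × β → Bool) :
    ∀ (l : List (α × β)) (acc : List α),
      l.foldl (fun acc kv => if p kv then acc ++ [kv.1] else acc) acc
        = acc ++ (l.filter p).map Prod.fst := by
  intro l
  induction l with
  | nil => simp
  | cons kv t ih =>
      intro acc
      by_cases h : p kv = true <;> simp [List.foldl_cons, h, ih]

-- A's second loop (pop each collected key) filters the items by non-membership in the key list.
theorem foldl_erase_items (ks : List String) :
    ∀ (d : PySem.Dict String (List Int)),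
      (ks.foldl (fun d k => d.erase k) d).items
        = d.items.filter (fun p => !(ks.contains p.1)) := by
  induction ks with
  | nil => intro d; simp
  | cons k t ih =>
      intro d
      rw [List.foldl_cons, ih]
      simp only [PySem.Dict.erase, List.filter_filter]
      apply List.filter_congr
      intro p _
      by_cases h1 : p.1 = k <;> by_cases h2 : p.1 ∈ t <;> simp [h1, h2]

-- On a nodup-keys dict, each entry's lookup returns its own value.
theorem getD_self_of_mem {m : List (String × List Int)} (hnd : (m.map Prod.fst).Nodup)
    {kv : String × List Int} (hm : kv ∈ m) :
    (PySem.Dict.mk m).getD kv.1 [] = kv.2 := by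
  exact PySem.Dict.getD_of_mem_items (d := PySem.Dict.mk m) hm hnd []

-- ===== VERDICT (by name: the statement is the Claim_ definition above) =====
theorem trimMapKey0_spec : Claim_equal_trimMapKey0 := by
  intro m _ hpre
  unfold Spec_trimMapKey0 trimMapKey0 trimMapKey0_alt
  simp only
  rw [foldl_append_key_if, List.nil_append, foldl_erase_items]
  have hitems : (PySem.Dict.mk m).items = m := rfl
  rw [hitems]
  apply List.filter_congr
  intro p hp
  have hget : (PySem.Dict.mk m).getD p.1 [] = p.2 := getD_self_of_mem hpre hp
  by_cases hl : p.2.length = 0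
  · have hmem : p.1 ∈ (List.filter (fun kv => ((PySem.Dict.mk m).getD kv.1 []).length == 0) m).map Prod.fst :=
      List.mem_map.mpr ⟨p, List.mem_filter.mpr ⟨hp, by simp [hget, hl]⟩, rfl⟩
    simp [hmem, hl]
  · have hnmem : p.1 ∉ (List.filter (fun kv => ((PySem.Dict.mk m).getD kv.1 []).length == 0) m).map Prod.fst := by
      intro hmem
      obtain ⟨q, hq, hq1⟩ := List.mem_map.mp hmem
      obtain ⟨hqm, hqc⟩ := List.mem_filter.mp hq
      rw [hq1, hget] at hqc
      simp at hqc
      exact hl (by simp [hqc])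
    simp [hnmem, hl]
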